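-- pv_equiv track=rewrite | github.com/ramii19780529/advent_of_code | 2021/day02.py | simulate_course
-- ===== SOURCE A (Python) =====
-- def simulate_course(data, use_aim = False):
--   # Just increment the correct variable based on
--   # the input in the file, then return the results.
--   horizontal_position, depth, aim = 0, 0, 0
--   for command, units in data:
--     if command == "forward":
--        horizontal_position += int(units)
--        depth += aim * int(units)
--     elif command == "down": aim += int(units)
--     elif command == "up": aim -= int(units)
--   # When not using aim (part 1) the aim is actually the depth.
--   return horizontal_position * (depth if use_aim else aim)
-- ===== SOURCE B (Python) =====
-- from itertools import accumulate
--
-- def simulate_course(data, use_aim=False):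
--     # Two-pass decomposition: parse recognized commands once (in source order,
--     # so int() errors fire at the same command as the original), build the
--     # running-aim prefix sequence, then sum the forward contributions.
--     moves = [(c, int(u)) for c, u in data if c in ("forward", "down", "up")]
--     aims = list(accumulate(
--         (0 if c == "forward" else v if c == "down" else -v for c, v in moves),
--         initial=0))
--     horizontal = sum(v for c, v in moves if c == "forward")
--     depth = sum(a * v for (c, v), a in zip(moves, aims) if c == "forward")
--     aim_total = aims[-1]
--     return horizontal * (depth if use_aim else aim_total)
-- ===== Notes on version B (the rewrite author's own statement) =====
-- stated objective: alternative
-- what changed: Replaced the single interleaved three-accumulator loop by a two-pass decomposition: parse recognized commands once, build the running-aim prefix sequence with itertools.accumulate, then compute horizontal and depth as sums over just the forward commands.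
import Mathlib
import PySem

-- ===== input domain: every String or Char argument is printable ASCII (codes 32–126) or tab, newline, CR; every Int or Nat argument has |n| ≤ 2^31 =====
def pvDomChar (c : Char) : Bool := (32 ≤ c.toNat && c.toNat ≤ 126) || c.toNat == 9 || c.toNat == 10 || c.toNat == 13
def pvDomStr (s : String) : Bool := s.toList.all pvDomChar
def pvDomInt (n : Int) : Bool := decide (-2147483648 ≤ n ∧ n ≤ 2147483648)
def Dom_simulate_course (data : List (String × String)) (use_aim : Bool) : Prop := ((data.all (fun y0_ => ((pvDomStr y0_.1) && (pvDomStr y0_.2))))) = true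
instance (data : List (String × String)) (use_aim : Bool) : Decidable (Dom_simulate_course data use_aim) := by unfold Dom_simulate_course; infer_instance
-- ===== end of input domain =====

-- B recomputes the course in two differently-shaped passes (prefix-aim sequence plus
-- sums over forward commands) instead of A's single interleaved accumulator loop;
-- objective: alternative decomposition, same cost.


-- ===== PORT A =====
-- A's single loop over (command, units) with state (horizontal_position, depth, aim).
-- int(units) raises on unparsable strings: Pre_ excludes those, so `.getD 0` is never hit inside Pre_.
def simulate_course (data : List (String × String)) (use_aim : Bool) : Int :=
  let st := data.foldl (fun (s : Int × Int × Int) p =>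
    let h := s.1; let d := s.2.1; let a := s.2.2
    let command := p.1; let units := p.2
    if command = "forward" then
      (h + (PySem.Int.ofStr? units).getD 0, d + a * (PySem.Int.ofStr? units).getD 0, a)
    else if command = "down" then (h, d, a + (PySem.Int.ofStr? units).getD 0)
    else if command = "up" then (h, d, a - (PySem.Int.ofStr? units).getD 0)
    else (h, d, a)) (0, 0, 0)
  st.1 * (if use_aim then st.2.1 else st.2.2)

-- ===== PORT B =====
-- B's passes: parsed recognized moves; aim deltas; running-aim prefix list (accumulate
-- with initial=0 → List.scanl); then sums over the forward commands only.
def simulate_course_alt (data : List (String × String)) (use_aim : Bool) : Int :=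
  let moves : List (String × Int) := data.filterMap (fun p =>
    if p.1 = "forward" ∨ p.1 = "down" ∨ p.1 = "up" then
      some (p.1, (PySem.Int.ofStr? p.2).getD 0)
    else none)
  let aims : List Int := (moves.map (fun m =>
    if m.1 = "forward" then 0 else if m.1 = "down" then m.2 else -m.2)).scanl (· + ·) 0
  let horizontal : Int := (((moves.filter (fun m => m.1 = "forward")).map (fun m => m.2)).sum)
  let depth : Int := (((moves.zip aims).filter (fun q => q.1.1 = "forward")).map
    (fun q => q.2 * q.1.2)).sum
  let aim_total : Int := (aims.getLast?).getD 0
  horizontal * (if use_aim then depth else aim_total)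

-- ===== PRECONDITION & SPEC =====
-- Pre_ excludes exactly the inputs where A raises ValueError: a recognized command
-- whose units string is not int()-parsable.
def Pre_simulate_course (data : List (String × String)) (use_aim : Bool) : Prop :=
  ∀ p ∈ data, (p.1 = "forward" ∨ p.1 = "down" ∨ p.1 = "up") → (PySem.Int.ofStr? p.2).isSome
instance (data : List (String × String)) (use_aim : Bool) : Decidable (Pre_simulate_course data use_aim) := by unfold Pre_simulate_course; infer_instance
def pvWitness_simulate_course : (List (String × String)) × Bool :=
  ([("forward", "2"), ("down", "3"), ("forward", " 4 "), ("up", "1")], true)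

def Spec_simulate_course (data : List (String × String)) (use_aim : Bool) (out : Int) : Prop := out = simulate_course_alt data use_aim
instance (data : List (String × String)) (use_aim : Bool) (out : Int) : Decidable (Spec_simulate_course data use_aim out) := by unfold Spec_simulate_course; infer_instance

-- ===== CLAIM (what is proved, stated in full; the proofs are below) =====
def Claim_equal_simulate_course : Prop := ∀ (data : List (String × String)) (use_aim : Bool), Dom_simulate_course data use_aim → Pre_simulate_course data use_aim → Spec_simulate_course data use_aim (simulate_course data use_aim)

-- ===== LEMMAS AND PROOFS =====

-- reference quantities (proof helpers only)
def pvVal (u : String) : Int := (PySem.Int.ofStr? u).getD 0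

def pvH : List (String × String) → Int
  | [] => 0
  | (c, u) :: rest => (if c = "forward" then pvVal u else 0) + pvH rest

def pvT : List (String × String) → Int
  | [] => 0
  | (c, u) :: rest =>
    (if c = "down" then pvVal u else if c = "up" then -(pvVal u) else 0) + pvT rest

def pvD : Int → List (String × String) → Int
  | _, [] => 0
  | a, (c, u) :: rest =>
    if c = "forward" then a * pvVal u + pvD a rest
    else if c = "down" then pvD (a + pvVal u) rest
    else if c = "up" then pvD (a - pvVal u) rest
    else pvD a rest

theorem foldA_eq (data : List (String × String)) :
    ∀ h d a : Int,
      data.foldl (fun (s : Int × Int × Int) p =>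
        let h := s.1; let d := s.2.1; let a := s.2.2
        let command := p.1; let units := p.2
        if command = "forward" then
          (h + (PySem.Int.ofStr? units).getD 0, d + a * (PySem.Int.ofStr? units).getD 0, a)
        else if command = "down" then (h, d, a + (PySem.Int.ofStr? units).getD 0)
        else if command = "up" then (h, d, a - (PySem.Int.ofStr? units).getD 0)
        else (h, d, a)) (h, d, a)
      = (h + pvH data, d + pvD a data, a + pvT data) := by
  induction data with
  | nil => intro h d a; simp [pvH, pvD, pvT]
  | cons p rest ih =>
    intro h d a
    obtain ⟨c, u⟩ := p
    by_cases hf : c = "forward"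
    · simp [List.foldl_cons, hf, ih, pvH, pvD, pvT, pvVal]; ring_nf; try simp
    · by_cases hd : c = "down"
      · simp [List.foldl_cons, hf, hd, ih, pvH, pvD, pvT, pvVal]; ring_nf; try simp
      · by_cases hu : c = "up"
        · simp [List.foldl_cons, hf, hd, hu, ih, pvH, pvD, pvT, pvVal]; ring_nf; try simp
        · simp [List.foldl_cons, hf, hd, hu, ih, pvH, pvD, pvT]

-- B-side helpers expressed over the raw data
def pvMoves (data : List (String × String)) : List (String × Int) :=
  data.filterMap (fun p =>
    if p.1 = "forward" ∨ p.1 = "down" ∨ p.1 = "up" then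
      some (p.1, (PySem.Int.ofStr? p.2).getD 0)
    else none)

theorem horizontal_eq (data : List (String × String)) :
    (((pvMoves data).filter (fun m => m.1 = "forward")).map (fun m => m.2)).sum = pvH data := by
  induction data with
  | nil => simp [pvMoves, pvH]
  | cons p rest ih =>
    obtain ⟨c, u⟩ := p
    by_cases hf : c = "forward"
    · simp [pvMoves, hf, pvH, pvVal] at *; omega
    · by_cases hd : c = "down"
      · simp [pvMoves, hd, pvH] at *; omega
      · by_cases hu : c = "up"
        · simp [pvMoves, hf, hd, hu, pvH] at *; omega
        · simp [pvMoves, hf, hd, hu, pvH] at *; omega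

theorem scanl_last (l : List Int) : ∀ a : Int, (((l.scanl (· + ·) a).getLast?).getD 0) = a + l.sum := by
  induction l with
  | nil => intro a; simp [List.scanl]
  | cons x xs ih =>
    intro a
    rw [List.scanl_cons]
    cases hxs : xs.scanl (· + ·) (a + x) with
    | nil => exfalso; have := congrArg List.length hxs; simp [List.length_scanl] at this
    | cons y ys =>
      rw [List.getLast?_cons_cons, ← hxs, ih]
      simp; ring

theorem sum_deltas_eq (data : List (String × String)) :
    ((pvMoves data).map (fun m =>
      if m.1 = "forward" then 0 else if m.1 = "down" then m.2 else -m.2)).sum = pvT data := by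
  induction data with
  | nil => simp [pvMoves, pvT]
  | cons p rest ih =>
    obtain ⟨c, u⟩ := p
    by_cases hf : c = "forward"
    · simp [pvMoves, List.filterMap_cons, hf, pvT, pvVal] at *; omega
    · by_cases hd : c = "down"
      · simp [pvMoves, List.filterMap_cons, hf, hd, pvT, pvVal] at *; omega
      · by_cases hu : c = "up"
        · simp [pvMoves, List.filterMap_cons, hf, hd, hu, pvT, pvVal] at *; omega
        · simp [pvMoves, List.filterMap_cons, hf, hd, hu, pvT] at *; omega

theorem depth_eq (data : List (String × String)) :
    ∀ a : Int,
      ((((pvMoves data).zip ((((pvMoves data).map (fun m =>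
          if m.1 = "forward" then 0 else if m.1 = "down" then m.2 else -m.2))).scanl (· + ·) a)).filter
          (fun q => q.1.1 = "forward")).map (fun q => q.2 * q.1.2)).sum = pvD a data := by
  induction data with
  | nil => intro a; simp [pvMoves, pvD]
  | cons p rest ih =>
    intro a
    obtain ⟨c, u⟩ := p
    by_cases hf : c = "forward"
    · simp [pvMoves, List.filterMap_cons, hf, List.scanl, pvD, pvVal] at *
      rw [ih]
    · by_cases hd : c = "down"
      · simp [pvMoves, List.filterMap_cons, hf, hd, List.scanl, pvD, pvVal] at *
        rw [ih]
      · by_cases hu : c = "up"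
        · simp [pvMoves, List.filterMap_cons, hf, hd, hu, List.scanl, pvD, pvVal] at *
          rw [ih]; ring_nf
        · have hmov : pvMoves ((c, u) :: rest) = pvMoves rest := by
            simp [pvMoves, hf, hd, hu]
          rw [hmov, ih]
          simp [pvD, hf, hd, hu]

-- ===== VERDICT (by name: the statement is the Claim_ definition above) =====
theorem simulate_course_spec : Claim_equal_simulate_course := by
  intro data use_aim _ _
  unfold Spec_simulate_course simulate_course simulate_course_alt
  rw [foldA_eq data 0 0 0]
  simp only []
  rw [show (data.filterMap (fun p =>
    if p.1 = "forward" ∨ p.1 = "down" ∨ p.1 = "up" then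
      some (p.1, (PySem.Int.ofStr? p.2).getD 0)
    else none)) = pvMoves data from rfl]
  rw [horizontal_eq, depth_eq, scanl_last, sum_deltas_eq]
  simp
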